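-- pv_equiv track=rewrite | github.com/Bismarck1862/Artificial_Intelligence | correlation_matrix.py | get_default_matrix
-- ===== SOURCE A (Python) =====
-- def get_default_matrix(size, default_value):
--     matrix = [[0 for _ in range(size)] for _ in range(size)]
--     for i in range(size):
--         j = 0
--         while j < i:
--             matrix[i][j] = default_value
--             j += 1
--     return matrix
-- ===== SOURCE B (Python) =====
-- def get_default_matrix(size, default_value):
--     rows = []
--     row = [0] * size
--     for _ in range(size):
--         rows.append(row)
--         row = [default_value] + row[:-1]
--     return rows
-- ===== Notes on version B (the rewrite author's own statement) =====
-- stated objective: alternative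
-- what changed: Rows are generated incrementally: starting from an all-zero row, each successive row is derived from the previous one by prepending default_value and dropping the last element, so the triangular pattern emerges from a row-to-row recurrence instead of allocating a zero matrix and overwriting its lower triangle cell by cell in nested loops.
import Mathlib
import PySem

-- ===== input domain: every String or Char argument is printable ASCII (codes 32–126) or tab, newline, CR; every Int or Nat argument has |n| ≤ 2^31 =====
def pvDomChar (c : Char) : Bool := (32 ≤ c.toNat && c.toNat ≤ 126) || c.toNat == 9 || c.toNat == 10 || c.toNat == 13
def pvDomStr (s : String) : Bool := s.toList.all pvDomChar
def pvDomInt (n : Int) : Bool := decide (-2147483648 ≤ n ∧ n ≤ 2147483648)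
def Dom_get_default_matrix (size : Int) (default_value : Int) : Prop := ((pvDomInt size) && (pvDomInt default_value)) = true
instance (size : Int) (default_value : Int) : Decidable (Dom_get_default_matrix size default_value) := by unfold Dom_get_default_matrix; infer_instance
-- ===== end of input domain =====

-- B derives each row from the previous one (prepend default_value, drop the last element),
-- instead of A's allocate-all-zeros matrix followed by a nested overwrite of the lower triangle.

-- ===== PORT A =====
-- matrix[i][j] = v  (indices here are always nonnegative and in range when reached)
def pvSet2 (m : List (List Int)) (i j v : Int) : List (List Int) :=
  m.set i.toNat ((m.getD i.toNat []).set j.toNat v)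

-- the inner 'while j < i' loop
def pvWhileA (m : List (List Int)) (i j v : Int) : List (List Int) :=
  if j < i then pvWhileA (pvSet2 m i j v) i (j + 1) v else m
termination_by (i - j).toNat
decreasing_by omega

def get_default_matrix (size : Int) (default_value : Int) : List (List Int) :=
  let matrix := (PySem.List.pyRange 0 size 1).map
    (fun _ => (PySem.List.pyRange 0 size 1).map (fun _ => (0 : Int)))
  (PySem.List.pyRange 0 size 1).foldl (fun m i => pvWhileA m i 0 default_value) matrix

-- ===== PORT B =====
-- state = (rows, row); each iteration appends the current row and derives the next one;
-- row[:-1] on a Python list is List.dropLast (exact: drops the last element, [] on []).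
def get_default_matrix_alt (size : Int) (default_value : Int) : List (List Int) :=
  ((PySem.List.pyRange 0 size 1).foldl
    (fun (st : List (List Int) × List Int) _ =>
      (st.1 ++ [st.2], default_value :: st.2.dropLast))
    ([], List.replicate size.toNat (0 : Int))).1

-- ===== PRECONDITION & SPEC =====
def Spec_get_default_matrix (size : Int) (default_value : Int) (out : List (List Int)) : Prop := out = get_default_matrix_alt size default_value
instance (size : Int) (default_value : Int) (out : List (List Int)) : Decidable (Spec_get_default_matrix size default_value out) := by unfold Spec_get_default_matrix; infer_instance

-- ===== CLAIM (what is proved, stated in full; the proofs are below) =====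
def Claim_equal_get_default_matrix : Prop := ∀ (size : Int) (default_value : Int), Dom_get_default_matrix size default_value → Spec_get_default_matrix size default_value (get_default_matrix size default_value)

-- ===== LEMMAS AND PROOFS =====

-- the common closed form both ports are shown to equal
def pvClosed (n : ℕ) (v : Int) : List (List Int) :=
  (List.range n).map (fun r => List.replicate r v ++ List.replicate (n - r) 0)

-- fill positions j..i-1 of a single row with v (row-level shadow of the while loop)
def pvFill (row : List Int) (j i v : Int) : List Int :=
  if j < i then pvFill (row.set j.toNat v) (j + 1) i v else row
termination_by (i - j).toNat
decreasing_by omega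

theorem pvWhileA_eq (m : List (List Int)) (i j v : Int) :
    pvWhileA m i j v = m.set i.toNat (pvFill (m.getD i.toNat []) j i v) := by
  unfold pvWhileA
  rw [pvFill]
  split
  · rw [pvWhileA_eq]
    by_cases h : i.toNat < m.length
    · unfold pvSet2
      rw [List.getD_eq_getElem?_getD, List.getD_eq_getElem?_getD,
        List.getElem?_set_self (by simpa using h), List.getElem?_eq_getElem h]
      simp [List.set_set]
    · have hlen : m.length ≤ i.toNat := by omega
      have hs : ∀ r : List Int, m.set i.toNat r = m := fun r => List.set_eq_of_length_le hlen
      have hg : m.getD i.toNat [] = [] := by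
        simp [List.getD_eq_getElem?_getD, List.getElem?_eq_none hlen]
      simp [pvSet2, hs]
  · by_cases h : i.toNat < m.length
    · rw [List.getD_eq_getElem?_getD, List.getElem?_eq_getElem h]
      simp
    · exact (List.set_eq_of_length_le (show m.length ≤ i.toNat by omega)).symm
termination_by (i - j).toNat
decreasing_by omega

-- filling a zeros-suffix row from position jn up to i
theorem pvFill_zeros (v : Int) (n : ℕ) : ∀ (jn i : ℕ), jn ≤ i → i ≤ n →
    pvFill (List.replicate jn v ++ List.replicate (n - jn) 0) (jn : Int) (i : Int) v
      = List.replicate i v ++ List.replicate (n - i) 0 := by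
  intro jn i h1 h2
  rw [pvFill]
  rcases Nat.lt_or_ge jn i with hlt | hge
  · have hcond : (jn : Int) < (i : Int) := by exact_mod_cast hlt
    rw [if_pos hcond]
    have hset : (List.replicate jn v ++ List.replicate (n - jn) (0 : Int)).set (jn : Int).toNat v
        = List.replicate (jn + 1) v ++ List.replicate (n - (jn + 1)) 0 := by
      apply List.ext_getElem
      · simp; omega
      · intro idx hA hB
        rw [List.getElem_set]
        simp only [Int.toNat_natCast]
        by_cases he : jn = idx
        · rw [if_pos he, List.getElem_append_left (by simp; omega)]
          simp [← he]
        · rw [if_neg he]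
          by_cases hlt2 : idx < jn
          · rw [List.getElem_append_left (by simpa using hlt2),
              List.getElem_append_left (by simp; omega)]
            simp
          · rw [List.getElem_append_right (by simp; omega),
              List.getElem_append_right (by simp; omega)]
            simp
    rw [hset]
    have hc : ((jn : Int) + 1) = ((jn + 1 : ℕ) : Int) := by push_cast; ring
    rw [hc]
    exact pvFill_zeros v n (jn + 1) i (by omega) h2
  · rw [if_neg (by exact_mod_cast Nat.not_lt.mpr hge)]
    have : jn = i := by omega
    rw [this]
termination_by jn i => i - jn
decreasing_by omega

-- the partially-processed matrix after the first k iterations of A's outer loop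
def pvM (n k : ℕ) (v : Int) : List (List Int) :=
  (List.range n).map (fun r => if r < k then List.replicate r v ++ List.replicate (n - r) 0
                               else List.replicate n 0)

theorem pvM_step (n k : ℕ) (v : Int) (_hk : k < n) :
    (pvM n k v).set k (List.replicate k v ++ List.replicate (n - k) 0) = pvM n (k + 1) v := by
  apply List.ext_getElem
  · simp [pvM]
  · intro idx h1 h2
    simp only [pvM, List.length_map, List.length_range] at h2 ⊢
    rw [List.getElem_set]
    by_cases h : k = idx
    · subst h; simp
    · simp only [if_neg h, List.getElem_map, List.getElem_range]
      have : idx < k ↔ idx < k + 1 := by omega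
      simp [this]

theorem pvFoldl_inv (n : ℕ) (v : Int) : ∀ (k : ℕ), k ≤ n →
    (PySem.List.pyRange 0 (k : Int) 1).foldl (fun m i => pvWhileA m i 0 v) (pvM n 0 v) = pvM n k v := by
  intro k
  induction k with
  | zero => intro _; simp [PySem.List.pyRange_one_eq_nil]
  | succ k ih =>
    intro _hk
    have hsplit : PySem.List.pyRange 0 ((k : Int) + 1) 1
        = PySem.List.pyRange 0 (k : Int) 1 ++ [(k : Int)] := by
      exact PySem.List.pyRange_one_succ_right (by positivity)
    have hcast : ((k + 1 : ℕ) : Int) = (k : Int) + 1 := by push_cast; ring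
    rw [hcast, hsplit, List.foldl_append, ih (by omega)]
    simp only [List.foldl_cons, List.foldl_nil]
    rw [pvWhileA_eq]
    have hkn : k < n := by omega
    have hg : (pvM n k v).getD (k : Int).toNat [] = List.replicate n 0 := by
      simp [pvM, List.getD_eq_getElem?_getD, List.getElem?_range hkn]
    rw [hg]
    have h0 : (List.replicate n (0 : Int)) = List.replicate 0 v ++ List.replicate (n - 0) 0 := by simp
    rw [h0]
    have := pvFill_zeros v n 0 k (by omega) (by omega)
    simp only [Nat.cast_zero] at this
    rw [this, Int.toNat_natCast, pvM_step n k v (by omega)]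

theorem A_eq_closed (size v : Int) :
    get_default_matrix size v = pvClosed size.toNat v := by
  unfold get_default_matrix
  rcases Decidable.em (size ≤ 0) with hle | hgt
  · rw [PySem.List.pyRange_one_eq_nil hle]
    have : size.toNat = 0 := by omega
    simp [this, pvClosed]
  · have hpos : 0 < size := by omega
    have hsz : size = ((size.toNat : ℕ) : Int) := by omega
    set n := size.toNat with hn
    have hinit : (PySem.List.pyRange 0 size 1).map
        (fun _ => (PySem.List.pyRange 0 size 1).map (fun _ => (0 : Int))) = pvM n 0 v := by
      have hlen : (PySem.List.pyRange 0 size 1).length = n := by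
        rw [PySem.List.length_pyRange_one]; omega
      rw [List.map_const', List.map_const', hlen, pvM]
      simp [List.map_const']
    rw [hinit, hsz, pvFoldl_inv n v n (le_refl n)]
    unfold pvM pvClosed
    apply List.map_congr_left
    intro r hr
    rw [List.mem_range] at hr
    rw [if_pos hr]

-- next-row recurrence: drop the last zero, prepend v
theorem row_step (v : Int) (k n : ℕ) (hk : k < n) :
    v :: (List.replicate k v ++ List.replicate (n - k) (0 : Int)).dropLast
      = List.replicate (k + 1) v ++ List.replicate (n - (k + 1)) 0 := by
  have hz : List.replicate (n - k) (0 : Int) = List.replicate (n - k - 1) 0 ++ [0] := by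
    rw [← List.replicate_succ']; congr 1; omega
  rw [hz, ← List.append_assoc, List.dropLast_concat, List.replicate_succ, List.cons_append]
  congr 2

-- invariant of B's fold: after k iterations the rows 0..k-1 are emitted and the
-- pending row is replicate k v ++ replicate (n-k) 0
theorem B_inv (n : ℕ) (v : Int) : ∀ (k : ℕ), k ≤ n →
    (PySem.List.pyRange 0 (k : Int) 1).foldl
      (fun (st : List (List Int) × List Int) _ =>
        (st.1 ++ [st.2], v :: st.2.dropLast))
      ([], List.replicate n (0 : Int))
    = (pvClosed n v |>.take k, List.replicate k v ++ List.replicate (n - k) 0) := by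
  intro k
  induction k with
  | zero => intro _; simp [PySem.List.pyRange_one_eq_nil]
  | succ k ih =>
    intro hk
    have hsplit : PySem.List.pyRange 0 ((k : Int) + 1) 1
        = PySem.List.pyRange 0 (k : Int) 1 ++ [(k : Int)] := by
      exact PySem.List.pyRange_one_succ_right (by positivity)
    have hcast : ((k + 1 : ℕ) : Int) = (k : Int) + 1 := by push_cast; ring
    rw [hcast, hsplit, List.foldl_append, ih (by omega)]
    simp only [List.foldl_cons, List.foldl_nil]
    have hkn : k < n := by omega
    rw [Prod.mk.injEq]
    constructor
    · show List.take k (pvClosed n v) ++ [List.replicate k v ++ List.replicate (n - k) 0]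
        = List.take (k + 1) (pvClosed n v)
      have hget : (pvClosed n v)[k]'(by simp [pvClosed]; omega)
          = List.replicate k v ++ List.replicate (n - k) 0 := by
        simp [pvClosed]
      rw [List.take_add_one, List.getElem?_eq_getElem (show k < (pvClosed n v).length by
        simp [pvClosed]; omega), hget]
      simp
    · exact row_step v k n hkn

theorem B_eq_closed (size v : Int) :
    get_default_matrix_alt size v = pvClosed size.toNat v := by
  unfold get_default_matrix_alt
  rcases Decidable.em (size ≤ 0) with hle | hgt
  · rw [PySem.List.pyRange_one_eq_nil hle]
    have : size.toNat = 0 := by omega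
    simp [this, pvClosed]
  · have hsz : size = ((size.toNat : ℕ) : Int) := by omega
    set n := size.toNat with hn
    rw [hsz, B_inv n v n (le_refl n)]
    simp [pvClosed]

-- ===== VERDICT (by name: the statement is the Claim_ definition above) =====
theorem get_default_matrix_spec : Claim_equal_get_default_matrix := by
  intro size v _
  unfold Spec_get_default_matrix
  rw [A_eq_closed, B_eq_closed]
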